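-- pv_equiv track=rewrite | github.com/yannispapadakis/delphi | predict/heatmap_reader.py | qos_class_new
-- ===== SOURCE A (Python) =====
-- def qos_class_new(qos, whisker, q3):
-- 	try:
-- 		w_class = qos.index(min([x for x in qos if x > whisker]))
-- 	except:
-- 		w_class = len(qos)
-- 	try:
-- 		q_class = qos.index(min([x for x in qos if x > q3]))
-- 	except:
-- 		q_class = len(qos)
-- 	return w_class + q_class
-- ===== SOURCE B (Python) =====
-- def _best_index(qos, threshold):
--     best_val = None
--     best_idx = None
--     for i, x in enumerate(qos):
--         if x > threshold and (best_val is None or x < best_val):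
--             best_val = x
--             best_idx = i
--     return len(qos) if best_idx is None else best_idx
--
-- def qos_class_new(qos, whisker, q3):
--     return _best_index(qos, whisker) + _best_index(qos, q3)
-- ===== Notes on version B (the rewrite author's own statement) =====
-- stated objective: alternative
-- what changed: Replaced, per threshold, the three passes (filter comprehension, min, list.index) plus try/except by a single enumerate scan keeping the running (best_val, best_idx) with a strict < update that preserves first-occurrence semantics; same O(n) cost (A's passes run in C builtins, so B is not faster).
import Mathlib
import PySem

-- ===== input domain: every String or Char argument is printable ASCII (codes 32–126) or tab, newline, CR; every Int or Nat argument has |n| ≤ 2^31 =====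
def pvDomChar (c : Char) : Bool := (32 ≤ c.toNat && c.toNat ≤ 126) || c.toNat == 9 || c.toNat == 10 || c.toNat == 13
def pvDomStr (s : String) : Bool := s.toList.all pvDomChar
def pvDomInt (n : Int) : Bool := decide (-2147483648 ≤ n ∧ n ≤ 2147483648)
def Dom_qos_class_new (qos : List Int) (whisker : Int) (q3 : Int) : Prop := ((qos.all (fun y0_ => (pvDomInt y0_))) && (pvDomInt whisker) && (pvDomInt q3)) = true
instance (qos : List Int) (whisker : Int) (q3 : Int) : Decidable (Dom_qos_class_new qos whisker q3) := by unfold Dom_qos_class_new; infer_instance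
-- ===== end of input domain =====

-- B replaces A's three passes per threshold (filter comprehension, min, .index) by one
-- enumerate scan maintaining (best_val, best_idx); return values proved equal.

-- ===== PORT A =====
-- one try-block of A: index of min of the filtered list, len(qos) on ValueError
def pyHalf (qos : List Int) (t : Int) : Int :=
  match PySem.List.min? (qos.filter (fun x => decide (t < x))) (fun y => y) with
  | none => (qos.length : Int)           -- min([]) raises ValueError, caught by the bare except
  | some m =>
    match PySem.List.index? qos m with
    | some i => (i : Int)
    | none => (qos.length : Int)         -- .index ValueError, caught by the same bare except

def qos_class_new (qos : List Int) (whisker : Int) (q3 : Int) : Int :=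
  pyHalf qos whisker + pyHalf qos q3

-- ===== PORT B =====
-- loop body of _best_index: update (best_val, best_idx) on x > threshold and strictly smaller x
def scanStep (t : Int) (acc : Option (Int × Int)) (p : Int × Int) : Option (Int × Int) :=
  if t < p.2 && (match acc with | none => true | some (bv, _) => decide (p.2 < bv)) then
    some (p.2, p.1)
  else acc

def bestIdx (qos : List Int) (t : Int) : Int :=
  match (PySem.List.enumerate qos).foldl (scanStep t) none with
  | none => (qos.length : Int)
  | some (_, i) => i

def qos_class_new_alt (qos : List Int) (whisker : Int) (q3 : Int) : Int :=
  bestIdx qos whisker + bestIdx qos q3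

-- ===== PRECONDITION & SPEC =====
def Spec_qos_class_new (qos : List Int) (whisker : Int) (q3 : Int) (out : Int) : Prop := out = qos_class_new_alt qos whisker q3
instance (qos : List Int) (whisker : Int) (q3 : Int) (out : Int) : Decidable (Spec_qos_class_new qos whisker q3 out) := by unfold Spec_qos_class_new; infer_instance

-- ===== CLAIM (what is proved, stated in full; the proofs are below) =====
def Claim_equal_qos_class_new : Prop := ∀ (qos : List Int) (whisker : Int) (q3 : Int), Dom_qos_class_new qos whisker q3 → Spec_qos_class_new qos whisker q3 (qos_class_new qos whisker q3)

-- ===== LEMMAS AND PROOFS =====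

-- reference recursion: first index (as an offset count) and value of the minimal element > t
def specRes (t : Int) : List Int → Option (Int × Nat)
  | [] => none
  | x :: xs =>
    if t < x then
      match specRes t xs with
      | some (m, k) => if m < x then some (m, k + 1) else some (x, 0)
      | none => some (x, 0)
    else
      (specRes t xs).map (fun p => (p.1, p.2 + 1))

-- left-biased minimum merge describing the scan accumulator
def mergeB (a b : Option (Int × Int)) : Option (Int × Int) :=
  match a, b with
  | none, b => b
  | a, none => a
  | some (av, ai), some (bv, bi) => if bv < av then some (bv, bi) else some (av, ai)

theorem scanStep_eq_merge (t : Int) (acc : Option (Int × Int)) (p : Int × Int) :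
    scanStep t acc p = mergeB acc (if t < p.2 then some (p.2, p.1) else none) := by
  rcases acc with _ | ⟨bv, bi⟩ <;> simp [scanStep, mergeB] <;> split_ifs <;> simp_all

theorem mergeB_assoc (a b c : Option (Int × Int)) :
    mergeB (mergeB a b) c = mergeB a (mergeB b c) := by
  rcases a with _ | ⟨av, ai⟩ <;> rcases b with _ | ⟨bv, bi⟩ <;> rcases c with _ | ⟨cv, ci⟩ <;>
    simp only [mergeB] <;> split_ifs <;>
      simp only [mergeB] <;> split_ifs <;> first | rfl | omega

theorem foldl_scan_acc (t : Int) (l : List (Int × Int)) (acc : Option (Int × Int)) :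
    l.foldl (scanStep t) acc = mergeB acc (l.foldl (scanStep t) none) := by
  induction l generalizing acc with
  | nil => cases acc <;> simp [mergeB]
  | cons p l ih =>
    simp only [List.foldl_cons]
    rw [ih (scanStep t acc p), ih (scanStep t none p), scanStep_eq_merge,
        scanStep_eq_merge t none p, mergeB_assoc]
    rcases h : (if t < p.2 then some (p.2, p.1) else none) with _ | _ <;> simp [mergeB]

theorem foldl_scan_spec (t : Int) (l : List Int) (s : Int) :
    (PySem.List.enumerate l s).foldl (scanStep t) none =
      (specRes t l).map (fun p => (p.1, s + (p.2 : Int))) := by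
  induction l generalizing s with
  | nil => simp [PySem.List.enumerate_nil, specRes]
  | cons x xs ih =>
    rw [PySem.List.enumerate_cons, List.foldl_cons, foldl_scan_acc, ih, scanStep_eq_merge]
    simp only [specRes]
    by_cases hx : t < x
    · rcases h : specRes t xs with _ | ⟨m, k⟩ <;> simp [hx, h, mergeB]
      split_ifs <;> simp <;> omega
    · rcases h : specRes t xs with _ | ⟨m, k⟩ <;> simp [hx, h, mergeB] <;> omega

theorem min_foldl (l : List Int) (a b : Int) :
    List.foldl min (min a b) l = min a (List.foldl min b l) := by
  induction l generalizing b with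
  | nil => simp
  | cons h t ih => simp only [List.foldl_cons, min_assoc, ih]

theorem specRes_pyHalf (t : Int) (l : List Int) :
    (match specRes t l with
      | none => l.filter (fun x => decide (t < x)) = []
      | some (m, k) => PySem.List.min? (l.filter (fun x => decide (t < x))) (fun y => y) = some m ∧
          PySem.List.index? l m = some k) := by
  induction l with
  | nil => simp [specRes]
  | cons x xs ih =>
    simp only [specRes]
    by_cases hx : t < x
    · rcases h : specRes t xs with _ | ⟨m, k⟩ <;> rw [h] at ih
      · simp only [h, hx]
        simp only [List.filter_cons, hx, decide_true, if_true, ih]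
        exact ⟨by simp [PySem.List.min?], PySem.List.index?_cons_self x xs⟩
      · obtain ⟨hmin, hidx⟩ := ih
        have hmem : m ∈ xs.filter (fun x => decide (t < x)) := PySem.List.min?_mem hmin
        rcases hf : xs.filter (fun x => decide (t < x)) with _ | ⟨fh, ft⟩
        · simp [hf] at hmem
        · have hmin' : ft.foldl min fh = m := by
            have := hmin; rw [hf, PySem.List.min?_id_cons] at this
            exact (Option.some.injEq _ _).mp this
          have hcons : PySem.List.min? ((x :: xs).filter (fun x => decide (t < x))) (fun y => y)
              = some (min x m) := by
            rw [List.filter_cons, if_pos (by simp [hx]), hf, PySem.List.min?_id_cons,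
                List.foldl_cons, ← hmin', min_foldl]
          simp only [h, hx, if_true]
          by_cases hmx : m < x
          · simp only [hmx, if_true]
            constructor
            · rw [hcons]; congr 1; omega
            · have hne : x ≠ m := by omega
              rw [PySem.List.index?_cons_of_ne xs hne, hidx]; rfl
          · simp only [hmx, if_false]
            constructor
            · rw [hcons]; congr 1; omega
            · exact PySem.List.index?_cons_self x xs
    · rcases h : specRes t xs with _ | ⟨m, k⟩ <;> rw [h] at ih <;>
        simp only [h, hx, if_false, Option.map_some, Option.map_none]
      · simp [List.filter_cons, hx, ih]
      · obtain ⟨hmin, hidx⟩ := ih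
        have hmem : m ∈ xs.filter (fun x => decide (t < x)) := PySem.List.min?_mem hmin
        have htm : t < m := by simpa using (List.mem_filter.mp hmem).2
        have hne : x ≠ m := by omega
        constructor
        · rw [List.filter_cons, if_neg (by simp [hx])]; exact hmin
        · rw [PySem.List.index?_cons_of_ne xs hne, hidx]; rfl

theorem bestIdx_eq_pyHalf (qos : List Int) (t : Int) : bestIdx qos t = pyHalf qos t := by
  have hs := specRes_pyHalf t qos
  unfold bestIdx pyHalf
  rw [foldl_scan_spec t qos 0]
  rcases h : specRes t qos with _ | ⟨m, k⟩ <;> rw [h] at hs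
  · simp [hs, PySem.List.min?]
  · obtain ⟨hmin, hidx⟩ := hs
    rw [PySem.List.index?_eq_idxOf?] at hidx
    simp [hmin, hidx]

-- ===== VERDICT (by name: the statement is the Claim_ definition above) =====
theorem qos_class_new_spec : Claim_equal_qos_class_new := by
  intro qos whisker q3 _
  show qos_class_new qos whisker q3 = qos_class_new_alt qos whisker q3
  unfold qos_class_new qos_class_new_alt
  rw [bestIdx_eq_pyHalf, bestIdx_eq_pyHalf]
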